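-- pv_equiv track=rewrite | github.com/p1x31/ctci-python | edx/cf/886/f.py | max_frogs_caught
-- ===== SOURCE A (Python) =====
-- def max_frogs_caught(n, hops):
--     hops.sort(reverse=True)
--     max_count = 0
--
--     for i in range(1, n+1):
--         count = 0
--         for j in range(n):
--             if (j + 1) * hops[j] >= i:
--                 count += 1
--             else:
--                 break
--         max_count = max(max_count, count)
--
--     return max_count
-- ===== SOURCE B (Python) =====
-- def max_frogs_caught(n, hops):
--     # Equivalence is about the return value only: A sorts hops in place, B leaves it untouched.
--     # The prefix count is non-increasing in the threshold i, so the max over i=1..n is the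
--     # count at i=1, i.e. the number of positive hops, capped at n.
--     if n <= 0:
--         return 0
--     return min(n, sum(1 for h in hops if h > 0))
-- ===== Notes on version B (the rewrite author's own statement) =====
-- stated objective: faster
-- what changed: The prefix count (j+1)*hops[j] >= i over the descending-sorted list is non-increasing in i, so the maximum over i=1..n is the count at i=1, which is just the number of positive hops capped at n; B computes that in one pass without sorting, replacing A's O(n^2) double loop.
import Mathlib
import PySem

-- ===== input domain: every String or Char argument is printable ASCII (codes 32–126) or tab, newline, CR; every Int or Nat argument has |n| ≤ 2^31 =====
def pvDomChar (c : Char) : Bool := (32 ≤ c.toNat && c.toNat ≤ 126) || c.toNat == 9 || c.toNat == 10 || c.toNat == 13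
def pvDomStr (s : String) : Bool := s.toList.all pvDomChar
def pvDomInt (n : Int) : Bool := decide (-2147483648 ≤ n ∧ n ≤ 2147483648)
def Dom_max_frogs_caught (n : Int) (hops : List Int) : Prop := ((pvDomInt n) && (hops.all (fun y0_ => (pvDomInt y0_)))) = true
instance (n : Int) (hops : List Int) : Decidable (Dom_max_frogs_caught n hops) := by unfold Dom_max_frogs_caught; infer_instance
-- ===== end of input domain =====

-- B computes A's answer without the double loop; equivalence is about the return value only
-- (A sorts hops in place, B does not mutate it).

-- ===== PORT A =====
-- inner 'for j in range(n): if (j+1)*hops[j] >= i: count += 1 else: break'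
-- (pyGet? = none is Python's IndexError; excluded by Pre_, the recursion just stops there)
def pvInnerA (s : List Int) (i : Int) : List Int → Int → Int
  | [], count => count
  | j :: js, count =>
    match PySem.List.pyGet? s j with
    | none => count
    | some h => if (j + 1) * h ≥ i then pvInnerA s i js (count + 1) else count

def max_frogs_caught (n : Int) (hops : List Int) : Int :=
  let s := PySem.List.sorted hops (fun x => x) true   -- hops.sort(reverse=True)
  let js := PySem.List.pyRange 0 n 1                  -- the inner loop's range(n), same every iteration
  (PySem.List.pyRange 1 (n + 1) 1).foldl
    (fun max_count i => max max_count (pvInnerA s i js 0)) 0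

-- ===== PORT B =====
def max_frogs_caught_alt (n : Int) (hops : List Int) : Int :=
  if n ≤ 0 then 0
  else min n (hops.foldl (fun acc h => if h > 0 then acc + 1 else acc) 0)

-- ===== PRECONDITION & SPEC =====
-- Pre_ excludes exactly the inputs where A raises IndexError: n > len(hops) with all hops positive.
def Pre_max_frogs_caught (n : Int) (hops : List Int) : Prop :=
  n ≤ (hops.length : Int) ∨ n ≤ 0 ∨ ∃ h ∈ hops, h ≤ 0
instance (n : Int) (hops : List Int) : Decidable (Pre_max_frogs_caught n hops) := by
  unfold Pre_max_frogs_caught; infer_instance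

def pvWitness_max_frogs_caught : Int × List Int := (2, [3, 1])

def Spec_max_frogs_caught (n : Int) (hops : List Int) (out : Int) : Prop := out = max_frogs_caught_alt n hops
instance (n : Int) (hops : List Int) (out : Int) : Decidable (Spec_max_frogs_caught n hops out) := by unfold Spec_max_frogs_caught; infer_instance

-- ===== CLAIM (what is proved, stated in full; the proofs are below) =====
def Claim_equal_max_frogs_caught : Prop := ∀ (n : Int) (hops : List Int), Dom_max_frogs_caught n hops → Pre_max_frogs_caught n hops → Spec_max_frogs_caught n hops (max_frogs_caught n hops)

-- ===== LEMMAS AND PROOFS =====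

-- the running count only grows
lemma pvInnerA_ge (s : List Int) (i : Int) :
    ∀ (js : List Int) (c : Int), c ≤ pvInnerA s i js c := by
  intro js
  induction js with
  | nil => intro c; simp [pvInnerA]
  | cons j js ih =>
    intro c
    simp only [pvInnerA]
    cases PySem.List.pyGet? s j with
    | none => exact le_refl c
    | some h =>
      by_cases hc : (j + 1) * h ≥ i
      · simp only [if_pos hc]; exact le_trans (by omega) (ih (c + 1))
      · simp only [if_neg hc]
        exact le_refl c

-- the prefix count is antitone in the threshold i
lemma pvInnerA_mono (s : List Int) (i i' : Int) (hii : i ≤ i') :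
    ∀ (js : List Int) (c : Int), pvInnerA s i' js c ≤ pvInnerA s i js c := by
  intro js
  induction js with
  | nil => intro c; simp [pvInnerA]
  | cons j js ih =>
    intro c
    simp only [pvInnerA]
    cases PySem.List.pyGet? s j with
    | none => exact le_refl c
    | some h =>
      by_cases hc' : (j + 1) * h ≥ i'
      · have hc : (j + 1) * h ≥ i := le_trans hii hc'
        simp only [if_pos hc, if_pos hc']
        exact ih (c + 1)
      · simp only [if_neg hc']
        by_cases hc : (j + 1) * h ≥ i
        · simp only [if_pos hc]
          exact le_trans (by omega) (pvInnerA_ge s i js (c + 1))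
        · simp only [if_neg hc]
          exact le_refl c

-- at threshold 1 the inner loop counts the leading positive entries of s.take m
lemma pvInnerA_one (s : List Int) :
    ∀ (m k : Nat) (c : Int),
      pvInnerA s 1 (PySem.List.pyRange (k : Int) ((k : Int) + (m : Int)) 1) c
        = c + ((((s.drop k).take m).takeWhile (fun h => decide (0 < h))).length : Int) := by
  intro m
  induction m with
  | zero => intro k c; simp [PySem.List.pyRange_one_eq_nil, pvInnerA]
  | succ m ih =>
    intro k c
    rw [PySem.List.pyRange_one_cons (by push_cast; omega)]
    simp only [pvInnerA]
    rw [PySem.List.pyGet?_natCast]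
    cases hk : s[k]? with
    | none =>
      have hlen : s.length ≤ k := by
        by_contra hlt
        simp [List.getElem?_eq_getElem (by omega : k < s.length)] at hk
      simp [List.drop_eq_nil_of_le hlen]
    | some h =>
      have hklt : k < s.length := by
        by_contra hge
        simp [List.getElem?_eq_none (by omega : s.length ≤ k)] at hk
      have hdrop : s.drop k = h :: s.drop (k + 1) := by
        rw [List.drop_eq_getElem_cons hklt]
        simp [List.getElem?_eq_getElem hklt] at hk
        rw [hk]
      have hrange : ((k : Int) + 1) = ((k + 1 : Nat) : Int) := by push_cast; ring
      have hrange2 : (k : Int) + ((m + 1 : Nat) : Int) = ((k + 1 : Nat) : Int) + (m : Int) := by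
        push_cast; ring
      by_cases hpos : 0 < h
      · have hc : ((k : Int) + 1) * h ≥ 1 := by nlinarith [Int.natCast_nonneg k]
        simp only [hrange, hrange2]
        rw [ih (k + 1) (c + 1)]
        rw [hdrop]
        simp [hpos]
        omega
      · have hc : ¬ ((k : Int) + 1) * h ≥ 1 := by
          intro hge
          nlinarith [Int.natCast_nonneg k]
        simp only [if_neg hc]
        rw [hdrop]
        simp [hpos]

-- on a descending list the positives are exactly a prefix
lemma takeWhile_pos_of_sorted :
    ∀ (l : List Int), l.Pairwise (fun a b => b ≤ a) →
      (l.takeWhile (fun h => decide (0 < h))).length = l.countP (fun h => decide (0 < h)) := by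
  intro l
  induction l with
  | nil => simp
  | cons h t ih =>
    intro hp
    rw [List.pairwise_cons] at hp
    by_cases hpos : 0 < h
    · simp [hpos, ih hp.2]
    · have hzero : t.countP (fun h => decide (0 < h)) = 0 := by
        rw [List.countP_eq_zero]
        intro x hx
        have := hp.1 x hx
        simp; omega
      simp [hpos, hzero]

-- takeWhile commutes with take (as lengths)
lemma length_takeWhile_take (p : Int → Bool) :
    ∀ (l : List Int) (m : Nat),
      ((l.take m).takeWhile p).length = min m (l.takeWhile p).length := by
  intro l
  induction l with
  | nil => intro m; simp
  | cons h t ih =>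
    intro m
    cases m with
    | zero => simp
    | succ m =>
      by_cases hp : p h
      · simp [hp, ih m]
      · simp [hp]

-- a fold of max over values all ≤ the accumulator stays put
lemma foldl_max_of_le (f : Int → Int) :
    ∀ (l : List Int) (a : Int), (∀ i ∈ l, f i ≤ a) →
      l.foldl (fun mc i => max mc (f i)) a = a := by
  intro l
  induction l with
  | nil => intro a _; rfl
  | cons x xs ih =>
    intro a hle
    simp only [List.foldl_cons]
    have hx : max a (f x) = a := max_eq_left (hle x (List.mem_cons_self))
    rw [hx]
    exact ih a (fun i hi => hle i (List.mem_cons_of_mem _ hi))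

-- B's fold counts the positive entries
lemma foldl_count_pos (l : List Int) :
    l.foldl (fun acc h => if h > 0 then acc + 1 else acc) 0
      = (l.countP (fun h => decide (0 < h)) : Int) := by
  have := PySem.List.foldl_if_add_one (fun h : Int => 0 < h) l 0
  simpa using this

-- main computation: A's value in closed form
lemma max_frogs_caught_eq (n : Int) (hops : List Int) :
    max_frogs_caught n hops = max_frogs_caught_alt n hops := by
  unfold max_frogs_caught max_frogs_caught_alt
  by_cases hn : n ≤ 0
  · rw [PySem.List.pyRange_one_eq_nil (by omega)]
    simp [hn]
  · simp only [if_neg hn]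
    set s := PySem.List.sorted hops (fun x => x) true with hs
    set cnt := hops.countP (fun h => decide (0 < h)) with hcnt
    have hperm : s.Perm hops := PySem.List.sorted_perm hops (fun x => x) true
    have hscnt : s.countP (fun h => decide (0 < h)) = cnt := hperm.countP_eq _
    have hpair : s.Pairwise (fun a b => b ≤ a) := by
      have := PySem.List.sorted_pairwise_rev hops (fun x => x)
      simpa [hs] using this
    -- the count at i = 1
    have hn' : (0 : Int) ≤ n := by omega
    have hs0 : (PySem.List.pyRange 0 n 1) = PySem.List.pyRange ((0 : Nat) : Int) (((0 : Nat) : Int) + ((n.toNat : Nat) : Int)) 1 := by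
      congr 1
      omega
    have hcount1 : pvInnerA s 1 (PySem.List.pyRange 0 n 1) 0
        = (min n.toNat ((s.takeWhile (fun h => decide (0 < h))).length) : Int) := by
      rw [hs0, pvInnerA_one s n.toNat 0 0]
      rw [List.drop_zero, length_takeWhile_take]
      push_cast
      omega
    have hcount1' : pvInnerA s 1 (PySem.List.pyRange 0 n 1) 0 = min n (cnt : Int) := by
      rw [hcount1, takeWhile_pos_of_sorted s hpair, hscnt]
      omega
    -- the outer loop: first iteration reaches the max, the rest cannot exceed it
    rw [PySem.List.pyRange_one_cons (a := 1) (b := n + 1) (by omega)]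
    simp only [List.foldl_cons]
    have hfirst : max 0 (pvInnerA s 1 (PySem.List.pyRange 0 n 1) 0)
        = pvInnerA s 1 (PySem.List.pyRange 0 n 1) 0 :=
      max_eq_right (pvInnerA_ge s 1 _ 0)
    rw [hfirst, foldl_max_of_le _ _ _ ?_, hcount1', foldl_count_pos hops]
    intro i hi
    rw [PySem.List.mem_pyRange_one] at hi
    exact pvInnerA_mono s 1 i (by omega) _ 0

-- ===== VERDICT (by name: the statement is the Claim_ definition above) =====
theorem max_frogs_caught_spec : Claim_equal_max_frogs_caught := by
  intro n hops _ hpre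
  unfold Spec_max_frogs_caught
  exact max_frogs_caught_eq n hops
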